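-- pv_equiv track=rewrite | github.com/devsetgo/devsetgo_lib | examples/csv_example_with_timer.py | create_sample_list
-- ===== SOURCE A (Python) =====
-- def create_sample_list(qty=10):
--     """
--     Create a sample list of lists with specified quantity.
--     """
--     headers = ["thing_one", "thing_two", "thing_three", "thing_four", "thing_five"]
--     sample_list = [headers]
--     for i in range(qty):
--         sample_list.append(
--             [f"item_{i+1}", f"item_{i+2}", f"item_{i+3}", f"item_{i+4}", f"item_{i+5}"]
--         )
--     return sample_list
-- ===== SOURCE B (Python) =====
-- def create_sample_list(qty=10):
--     """
--     Create a sample list of lists with specified quantity.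
--     """
--     headers = ["thing_one", "thing_two", "thing_three", "thing_four", "thing_five"]
--     items = [f"item_{k}" for k in range(1, qty + 5)]
--     return [headers] + [items[i:i + 5] for i in range(qty)]
-- ===== Notes on version B (the rewrite author's own statement) =====
-- stated objective: alternative
-- what changed: B precomputes one shared flat list of item strings and builds each row as an overlapping length-5 slice (window) of it, instead of formatting five fresh strings per row.
import Mathlib
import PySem

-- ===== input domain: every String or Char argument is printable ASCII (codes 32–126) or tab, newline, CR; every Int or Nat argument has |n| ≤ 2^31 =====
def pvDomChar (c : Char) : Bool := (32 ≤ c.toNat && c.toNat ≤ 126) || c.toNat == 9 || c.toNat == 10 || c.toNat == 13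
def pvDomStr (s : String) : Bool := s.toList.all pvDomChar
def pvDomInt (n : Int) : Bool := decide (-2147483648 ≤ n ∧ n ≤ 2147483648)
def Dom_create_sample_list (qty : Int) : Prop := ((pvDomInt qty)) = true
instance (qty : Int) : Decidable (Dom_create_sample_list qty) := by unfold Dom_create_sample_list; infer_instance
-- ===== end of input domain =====

-- B builds each row as an overlapping length-5 slice of one shared precomputed flat item list.


-- ===== PORT A =====
def pvHeaders : List String := ["thing_one", "thing_two", "thing_three", "thing_four", "thing_five"]

def create_sample_list (qty : Int) : List (List String) :=
  (PySem.List.pyRange 0 qty 1).foldl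
    (fun sample_list i =>
      sample_list ++
        [["item_" ++ PySem.Int.toStr (i + 1), "item_" ++ PySem.Int.toStr (i + 2),
          "item_" ++ PySem.Int.toStr (i + 3), "item_" ++ PySem.Int.toStr (i + 4),
          "item_" ++ PySem.Int.toStr (i + 5)]])
    [pvHeaders]

-- ===== PORT B =====
def create_sample_list_alt (qty : Int) : List (List String) :=
  let items := (PySem.List.pyRange 1 (qty + 5) 1).map (fun k => "item_" ++ PySem.Int.toStr k)
  [pvHeaders] ++ (PySem.List.pyRange 0 qty 1).map (fun i => PySem.List.slice items (some i) (some (i + 5)))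

-- ===== PRECONDITION & SPEC =====
def Spec_create_sample_list (qty : Int) (out : List (List String)) : Prop := out = create_sample_list_alt qty
instance (qty : Int) (out : List (List String)) : Decidable (Spec_create_sample_list qty out) := by unfold Spec_create_sample_list; infer_instance

-- ===== CLAIM (what is proved, stated in full; the proofs are below) =====
def Claim_equal_create_sample_list : Prop := ∀ (qty : Int), Dom_create_sample_list qty → Spec_create_sample_list qty (create_sample_list qty)

-- ===== LEMMAS AND PROOFS =====

-- a window of the shared item list is exactly the five strings A formats for row i
lemma window_eq (f : Int → String) (qty i : Int) (h0 : 0 ≤ i) (h1 : i < qty) :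
    PySem.List.slice ((PySem.List.pyRange 1 (qty + 5) 1).map f) (some i) (some (i + 5))
      = [f (i + 1), f (i + 2), f (i + 3), f (i + 4), f (i + 5)] := by
  rw [PySem.List.pyRange_one_append 1 (i + 1) (qty + 5) (by omega) (by omega),
      PySem.List.pyRange_one_append (i + 1) (i + 6) (qty + 5) (by omega) (by omega)]
  rw [PySem.List.slice_toNat _ h0 (by omega)]
  have hlen : ((PySem.List.pyRange 1 (i + 1) 1).map f).length = i.toNat := by
    simp [PySem.List.length_pyRange_one]
  rw [List.map_append, List.map_append, List.drop_left' hlen]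
  have h6 : ((i + 5).toNat - i.toNat) = 5 := by omega
  rw [h6]
  rw [show i + 6 = (i+5) + 1 from by ring, PySem.List.pyRange_one_succ_right (by omega),
      show i + 5 = (i+4) + 1 from by ring, PySem.List.pyRange_one_succ_right (by omega),
      show i + 4 = (i+3) + 1 from by ring, PySem.List.pyRange_one_succ_right (by omega),
      show i + 3 = (i+2) + 1 from by ring, PySem.List.pyRange_one_succ_right (by omega),
      show i + 2 = (i+1) + 1 from by ring, PySem.List.pyRange_one_singleton]
  simp

-- ===== VERDICT (by name: the statement is the Claim_ definition above) =====
theorem create_sample_list_spec : Claim_equal_create_sample_list := by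
  intro qty _
  unfold Spec_create_sample_list create_sample_list create_sample_list_alt
  rw [PySem.List.foldl_append_singleton_eq_map]
  refine congrArg _ (List.map_congr_left ?_)
  intro i hi
  rw [PySem.List.mem_pyRange_one] at hi
  exact (window_eq (fun k => "item_" ++ PySem.Int.toStr k) qty i hi.1 hi.2).symm
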